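-- pv_equiv track=rewrite | github.com/XezXey/guided-diffusion | guided_diffusion/dataloader/paired_datasets/img_deca_presample_paired_datasets.py | image_path_list_to_sjdict
-- ===== SOURCE A (Python) =====
-- def image_path_list_to_sjdict(path_list):
--     '''
--     Take the path of images and output the dict {sj_name: [img_name1, img_name2, ...]}
--     e.g. {60065 : [/<path>/60065_00_00.jpg, /<path>/60065_00_01.jpg, ...]}
--     '''
--     sj_paths_dict = {}
--     for path in path_list:
--         img_name = path.split('/')[-1]
--         sj_name = img_name.split('_')[0]
--         if 'anno_' in img_name:
--             img_name = img_name.split('anno_')[-1]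
--         if sj_name not in sj_paths_dict.keys():
--             sj_paths_dict[sj_name] = [img_name]
--         else:
--             sj_paths_dict[sj_name].append(img_name)
--     return sj_paths_dict
-- ===== SOURCE B (Python) =====
-- def image_path_list_to_sjdict(path_list):
--     '''
--     Two-phase re-implementation: parse every path to a (sj_name, img_name)
--     pair once, then build the dict per key by filtering the pair list,
--     instead of incrementally maintaining a mutable dict.
--     '''
--     def parse(path):
--         img_name = path.split('/')[-1]
--         sj_name = img_name.split('_')[0]
--         if 'anno_' in img_name:
--             img_name = img_name.split('anno_')[-1]
--         return sj_name, img_name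
--
--     pairs = [parse(p) for p in path_list]
--     keys = dict.fromkeys(sj for sj, _ in pairs)
--     return {sj: [name for s, name in pairs if s == sj] for sj in keys}
-- ===== Notes on version B (the rewrite author's own statement) =====
-- stated objective: alternative
-- what changed: Replaces A's single incremental pass that maintains a mutable dict (insert-or-append per path) with a two-phase pipeline: map every path to a (sj_name, img_name) pair once, take the first-occurrence-ordered distinct keys, and build each key's list by filtering the pair list.
import Mathlib
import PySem

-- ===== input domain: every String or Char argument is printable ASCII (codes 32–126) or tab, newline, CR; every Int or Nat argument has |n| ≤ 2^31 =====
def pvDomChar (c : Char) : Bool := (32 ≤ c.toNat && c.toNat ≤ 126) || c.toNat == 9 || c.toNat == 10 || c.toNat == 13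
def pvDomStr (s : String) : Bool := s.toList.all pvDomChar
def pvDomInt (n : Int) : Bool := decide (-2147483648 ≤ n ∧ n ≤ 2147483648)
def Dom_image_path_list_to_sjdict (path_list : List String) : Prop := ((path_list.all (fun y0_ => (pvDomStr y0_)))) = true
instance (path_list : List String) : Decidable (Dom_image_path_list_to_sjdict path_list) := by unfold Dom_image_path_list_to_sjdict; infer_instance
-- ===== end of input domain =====

-- B replaces A's incremental mutable-dict grouping with a two-phase pipeline
-- (parse all paths to (sj_name, img_name) pairs, then build each key's list by
-- filtering the pair list); objective: a simpler, alternative decomposition.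

-- ===== PORT A =====
-- path.split(sep) with the nonempty literal separators "/" "_" "anno_" never
-- raises and always yields a nonempty list, so split? is some and the [-1]/[0]
-- indexing is in range: pyGetD with default "" is exact here.
def image_path_list_to_sjdict (path_list : List String) : List (String × List String) :=
  (path_list.foldl
    (fun (sj_paths_dict : PySem.Dict String (List String)) path =>
      let img_name := PySem.List.pyGetD ((PySem.Str.split? path "/").getD []) (-1) ""
      let sj_name := PySem.List.pyGetD ((PySem.Str.split? img_name "_").getD []) 0 ""
      let img_name :=
        if PySem.Str.isIn "anno_" img_name then
          PySem.List.pyGetD ((PySem.Str.split? img_name "anno_").getD []) (-1) ""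
        else img_name
      if sj_paths_dict.contains sj_name = false then
        sj_paths_dict.insert sj_name [img_name]
      else
        PySem.Dict.modify sj_paths_dict sj_name [] (fun l => l ++ [img_name]))
    (PySem.Dict.mk [])).items

-- ===== PORT B =====
-- B-side helper: Source B's inner 'parse'
def pvParse (path : String) : String × String :=
  let img_name := PySem.List.pyGetD ((PySem.Str.split? path "/").getD []) (-1) ""
  let sj_name := PySem.List.pyGetD ((PySem.Str.split? img_name "_").getD []) 0 ""
  let img_name :=
    if PySem.Str.isIn "anno_" img_name then
      PySem.List.pyGetD ((PySem.Str.split? img_name "anno_").getD []) (-1) ""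
    else img_name
  (sj_name, img_name)

def image_path_list_to_sjdict_alt (path_list : List String) : List (String × List String) :=
  let pairs := path_list.map pvParse
  (PySem.List.dedup (pairs.map Prod.fst)).map
    (fun sj => (sj, (pairs.filter (fun p => p.1 == sj)).map Prod.snd))

-- ===== PRECONDITION & SPEC =====
def Spec_image_path_list_to_sjdict (path_list : List String) (out : List (String × List String)) : Prop := out = image_path_list_to_sjdict_alt path_list
instance (path_list : List String) (out : List (String × List String)) : Decidable (Spec_image_path_list_to_sjdict path_list out) := by unfold Spec_image_path_list_to_sjdict; infer_instance

-- ===== CLAIM (what is proved, stated in full; the proofs are below) =====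
def Claim_equal_image_path_list_to_sjdict : Prop := ∀ (path_list : List String), Dom_image_path_list_to_sjdict path_list → Spec_image_path_list_to_sjdict path_list (image_path_list_to_sjdict path_list)

-- ===== LEMMAS AND PROOFS =====

-- A's loop step, abstracted over an already-parsed pair
def pvStep (d : PySem.Dict String (List String)) (p : String × String) :
    PySem.Dict String (List String) :=
  if d.contains p.1 = false then d.insert p.1 [p.2]
  else PySem.Dict.modify d p.1 [] (fun l => l ++ [p.2])

-- B's grouping, abstracted over the parsed pair list
def pvGroup (ps : List (String × String)) : List (String × List String) :=
  (PySem.List.dedup (ps.map Prod.fst)).map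
    (fun sj => (sj, (ps.filter (fun p => p.1 == sj)).map Prod.snd))

theorem pvGroup_keys (ps : List (String × String)) :
    pvGroup ps = (PySem.Set.ofList (ps.map Prod.fst)).map
      (fun sj => (sj, (ps.filter (fun p => p.1 == sj)).map Prod.snd)) := by
  simp [pvGroup, PySem.List.dedup_eq_ofList]

theorem pv_find?_map_keys (l : List String) (f : String → List String) (k : String)
    (h : k ∈ l) :
    List.find? (fun p => p.1 == k) (l.map fun k' => (k', f k')) = some (k, f k) := by
  induction l with
  | nil => cases h
  | cons a l ih =>
    by_cases hak : a = k
    · subst hak; simp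
    · have h' : k ∈ l := by
        rcases List.mem_cons.1 h with h1 | h1
        · exact absurd h1.symm hak
        · exact h1
      have hka : (a == k) = false := by simp [hak]
      simp [hka, ih h']

theorem pv_any_map_keys (l : List String) (f : String → List String) (k : String) :
    ((l.map fun k' => (k', f k')).any fun p => p.1 == k) = l.contains k := by
  induction l with
  | nil => rfl
  | cons a l ih =>
    by_cases hak : a = k
    · subst hak; simp
    · have h1 : (a == k) = false := by simp [hak]
      have h2 : (decide (k = a)) = false := by
        simp only [decide_eq_false_iff_not]
        exact fun h => hak h.symm
      simp [h1, h2, ih]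

theorem pv_step_snoc (qs : List (String × String)) (p : String × String) :
    pvStep (PySem.Dict.mk (pvGroup qs)) p = PySem.Dict.mk (pvGroup (qs ++ [p])) := by
  obtain ⟨k, v⟩ := p
  have hmemS : ∀ x, x ∈ PySem.Set.ofList (qs.map Prod.fst) ↔ x ∈ qs.map Prod.fst :=
    fun x => PySem.Set.mem_ofList _ x
  have hcontb : (PySem.Dict.mk (pvGroup qs)).contains k
      = decide (k ∈ qs.map Prod.fst) := by
    show (pvGroup qs).any (fun p => p.1 == k) = _
    rw [pvGroup_keys, pv_any_map_keys]
    simp [List.contains_eq_mem, hmemS]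
  have hofsnoc : PySem.Set.ofList ((qs ++ [(k, v)]).map Prod.fst)
      = PySem.Set.add (PySem.Set.ofList (qs.map Prod.fst)) k := by
    simp [PySem.Set.ofList_eq_foldl, List.foldl_append]
  have hka : ∀ a : String, a ≠ k → (k == a) = false := by
    intro a hak
    simp only [beq_eq_false_iff_ne, ne_eq]
    exact fun hh => hak hh.symm
  by_cases hk : k ∈ qs.map Prod.fst
  · -- key already present: A modifies in place, B's filter gains v at the end
    have hkS : k ∈ PySem.Set.ofList (qs.map Prod.fst) := (hmemS k).2 hk
    have hget : (PySem.Dict.mk (pvGroup qs)).get? k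
        = some ((qs.filter (fun p => p.1 == k)).map Prod.snd) := by
      show Option.map _ (List.find? (fun p => p.1 == k) (pvGroup qs)) = _
      rw [pvGroup_keys, pv_find?_map_keys _ _ _ hkS]
      rfl
    have hkeys : PySem.Set.ofList ((qs ++ [(k, v)]).map Prod.fst)
        = PySem.Set.ofList (qs.map Prod.fst) := by
      rw [hofsnoc]
      simp [PySem.Set.add, List.contains_eq_mem, hmemS, hk]
    rw [pvStep, hcontb]
    simp only [hk, decide_true, Bool.true_eq_false, if_false]
    rw [PySem.Dict.modify, PySem.Dict.getD, hget, Option.getD_some, PySem.Dict.insert,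
      hcontb]
    simp only [hk, decide_true, if_true]
    congr 1
    rw [pvGroup_keys, pvGroup_keys, hkeys, List.map_map]
    refine List.map_congr_left ?_
    intro a haS
    by_cases hak : a = k
    · subst hak
      simp [Function.comp, List.filter_append, List.filter]
    · simp [Function.comp, hka a hak, List.filter_append, List.filter, hak]
  · -- new key: A appends a fresh entry, B's key list gains k at the end
    have hkS : k ∉ PySem.Set.ofList (qs.map Prod.fst) := fun h => hk ((hmemS k).1 h)
    have hkeys : PySem.Set.ofList ((qs ++ [(k, v)]).map Prod.fst)
        = PySem.Set.ofList (qs.map Prod.fst) ++ [k] := by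
      rw [hofsnoc]
      simp [PySem.Set.add, List.contains_eq_mem, hmemS, hk]
    have hfilnil : qs.filter (fun p => p.1 == k) = [] := by
      rw [List.filter_eq_nil_iff]
      intro a ha hbeq
      refine hk ?_
      have : a.1 = k := by simpa using hbeq
      exact this ▸ List.mem_map_of_mem ha
    rw [pvStep, hcontb]
    simp only [hk, decide_false, if_true]
    rw [PySem.Dict.insert, hcontb]
    simp only [hk, decide_false, Bool.false_eq_true, if_false]
    congr 1
    rw [pvGroup_keys, pvGroup_keys, hkeys, List.map_append]
    congr 1
    · refine List.map_congr_left ?_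
      intro a haS
      have hak : a ≠ k := fun h => hkS (h ▸ haS)
      simp [List.filter_append, List.filter, hka a hak]
    · simp [List.filter_append, List.filter, hfilnil]

theorem pv_foldl_group (ps qs : List (String × String)) :
    List.foldl pvStep (PySem.Dict.mk (pvGroup qs)) ps
      = PySem.Dict.mk (pvGroup (qs ++ ps)) := by
  induction ps generalizing qs with
  | nil => simp
  | cons p ps ih =>
    rw [List.foldl_cons, pv_step_snoc, ih]
    simp

theorem pv_A_eq_foldl (path_list : List String) :
    image_path_list_to_sjdict path_list
      = (List.foldl pvStep (PySem.Dict.mk []) (path_list.map pvParse)).items := by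
  rw [image_path_list_to_sjdict, List.foldl_map]
  rfl

theorem pv_B_eq_group (path_list : List String) :
    image_path_list_to_sjdict_alt path_list = pvGroup (path_list.map pvParse) := rfl

-- ===== VERDICT (by name: the statement is the Claim_ definition above) =====
theorem image_path_list_to_sjdict_spec : Claim_equal_image_path_list_to_sjdict := by
  intro path_list _
  show image_path_list_to_sjdict path_list = image_path_list_to_sjdict_alt path_list
  rw [pv_A_eq_foldl, pv_B_eq_group]
  have h0 : PySem.Dict.mk ([] : List (String × List String)) = PySem.Dict.mk (pvGroup []) := rfl
  rw [h0, pv_foldl_group]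
  simp
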